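-- pv_equiv track=rewrite | github.com/torvictorvic/py-extraction-scripts | global_custom_scripts/pagofacil_parser.py | process_header_1
-- ===== SOURCE A (Python) =====
-- def process_header_1(header):
--     n = [1, 8, 25, 9, 35, 20]
--     res=[]
--     for split in n:
--         temp=header[:split]
--         header=header[split:]
--         res.append(temp)
--     return res
-- ===== SOURCE B (Python) =====
-- def process_header_1(header):
--     # Build cumulative offsets first, then slice header over adjacent offset pairs.
--     n = [1, 8, 25, 9, 35, 20]
--     offsets = [0]
--     for w in n:
--         offsets.append(offsets[-1] + w)
--     return [header[a:b] for a, b in zip(offsets, offsets[1:])]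
-- ===== Notes on version B (the rewrite author's own statement) =====
-- stated objective: simpler
-- what changed: B precomputes the cumulative offset table from the width list and slices the untouched header over adjacent offset pairs, instead of A's consume-and-shrink loop that reassigns header each iteration.
import Mathlib
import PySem

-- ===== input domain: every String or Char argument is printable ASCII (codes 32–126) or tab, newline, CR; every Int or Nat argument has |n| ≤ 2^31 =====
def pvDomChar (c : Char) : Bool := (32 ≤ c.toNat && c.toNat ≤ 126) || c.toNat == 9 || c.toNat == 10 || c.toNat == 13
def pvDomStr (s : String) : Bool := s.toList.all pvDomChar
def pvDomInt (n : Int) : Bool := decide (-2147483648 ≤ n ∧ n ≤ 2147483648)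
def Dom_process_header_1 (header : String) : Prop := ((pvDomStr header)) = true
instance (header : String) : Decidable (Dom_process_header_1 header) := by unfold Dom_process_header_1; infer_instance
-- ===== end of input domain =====

-- B precomputes the cumulative offset table from the fixed width list and slices the untouched header over adjacent offset pairs (objective: simpler), instead of A's consume-and-shrink loop; same values everywhere.


-- ===== PORT A =====
def process_header_1 (header : String) : List String :=
  let n : List Int := [1, 8, 25, 9, 35, 20]
  (n.foldl (fun (st : List Char × List String) split =>
      let temp := PySem.List.slice st.1 none (some split)
      let header' := PySem.List.slice st.1 (some split) none
      (header', st.2 ++ [String.ofList temp])) (header.toList, [])).2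

-- ===== PORT B =====
def process_header_1_alt (header : String) : List String :=
  let n : List Int := [1, 8, 25, 9, 35, 20]
  let offsets := n.foldl (fun acc w => acc ++ [PySem.List.pyGetD acc (-1) 0 + w]) ([0] : List Int)
  (offsets.zip offsets.tail).map (fun p =>
    String.ofList (PySem.List.slice header.toList (some p.1) (some p.2)))

-- ===== PRECONDITION & SPEC =====
def Spec_process_header_1 (header : String) (out : List String) : Prop := out = process_header_1_alt header
instance (header : String) (out : List String) : Decidable (Spec_process_header_1 header out) := by unfold Spec_process_header_1; infer_instance

-- ===== CLAIM (what is proved, stated in full; the proofs are below) =====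
def Claim_equal_process_header_1 : Prop := ∀ (header : String), Dom_process_header_1 header → Spec_process_header_1 header (process_header_1 header)

-- ===== LEMMAS AND PROOFS =====

-- ===== VERDICT (by name: the statement is the Claim_ definition above) =====
theorem process_header_1_spec : Claim_equal_process_header_1 := by
  intro header _
  unfold Spec_process_header_1 process_header_1 process_header_1_alt
  simp [List.foldl, PySem.List.pyGetD, PySem.List.pyGet?, PySem.List.pyIdx?,
        PySem.List.slice_toNat, PySem.List.slice_to, PySem.List.slice_from, List.drop_drop]
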